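-- pv_equiv track=rewrite | github.com/marysiuniq/advent_of_code_2020 | 23/puzzle_23_1.py | destination_cup
-- ===== SOURCE A (Python) =====
-- def destination_cup(in_lst, cup):
--     '''
--     Finds the index of destination cup in in_lst, for current cup cup.
--     '''
--     def is_in_list(in_lst, cup):
--         res = True
--         try:
--             in_lst.index(cup-1)
--         except ValueError:
--             res = False
--         return res
--     if is_in_list(in_lst, cup):
--         return in_lst.index(cup-1)
--     if cup == min(in_lst):
--         cup = max(in_lst)
--         return destination_cup(in_lst, cup+1)
--     return destination_cup(in_lst, cup-1)
-- ===== SOURCE B (Python) =====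
-- def destination_cup(in_lst, cup):
--     '''
--     Finds the index of destination cup in in_lst, for current cup cup.
--     Single pass: the destination is the largest value below cup, or the
--     overall maximum when no value is below cup (the wrap-around).
--     '''
--     below = [x for x in in_lst if x < cup]
--     target = max(below) if below else max(in_lst)
--     return in_lst.index(target)
-- ===== Notes on version B (the rewrite author's own statement) =====
-- stated objective: faster
-- what changed: Replaced A's downward recursive search (one list.index scan per candidate value cup-1, cup-2, ...) by a single filter pass: the destination is the largest value below cup, or the overall maximum when none exists (the wrap), followed by one index lookup.
import Mathlib
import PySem

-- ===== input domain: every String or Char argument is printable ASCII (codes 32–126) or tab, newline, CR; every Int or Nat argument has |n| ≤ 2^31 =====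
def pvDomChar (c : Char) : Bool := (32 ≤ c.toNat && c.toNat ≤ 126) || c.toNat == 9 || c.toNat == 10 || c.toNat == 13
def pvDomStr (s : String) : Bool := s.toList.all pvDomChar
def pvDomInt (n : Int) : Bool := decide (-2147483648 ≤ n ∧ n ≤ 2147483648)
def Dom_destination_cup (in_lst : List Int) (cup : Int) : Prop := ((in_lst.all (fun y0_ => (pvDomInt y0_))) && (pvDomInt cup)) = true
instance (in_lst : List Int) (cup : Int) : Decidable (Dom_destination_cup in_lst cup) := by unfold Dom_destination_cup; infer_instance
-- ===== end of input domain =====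

-- B replaces A's downward recursive candidate search (a list.index scan per candidate)
-- by one filter pass (largest value below cup, else the maximum) and a single index lookup: faster.


-- ===== PORT A =====
-- A's recursion, made total with a fuel counter (fuel 0 is never reached on Pre_ inputs).
def destCupGo (in_lst : List Int) (cup : Int) : Nat → Int
  | 0 => 0
  | fuel + 1 =>
    match PySem.List.index? in_lst (cup - 1) with       -- is_in_list + in_lst.index(cup-1)
    | some i => (i : Int)
    | none =>
      match PySem.List.min? in_lst (fun x => x) with    -- min(in_lst); [] raises (outside Pre_)
      | none => 0
      | some lo =>
        if cup = lo then
          match PySem.List.max? in_lst (fun x => x) with  -- max(in_lst)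
          | none => 0
          | some hi => destCupGo in_lst (hi + 1) fuel
        else destCupGo in_lst (cup - 1) fuel

def destination_cup (in_lst : List Int) (cup : Int) : Int :=
  match PySem.List.min? in_lst (fun x => x) with
  | none => 0                                           -- min([]) raises ValueError (outside Pre_)
  | some lo => destCupGo in_lst cup ((cup - lo).toNat + 2)

-- ===== PORT B =====
def destination_cup_alt (in_lst : List Int) (cup : Int) : Int :=
  let below := in_lst.filter (fun x => decide (x < cup))
  match (if below.isEmpty then PySem.List.max? in_lst (fun x => x)
         else PySem.List.max? below (fun x => x)) with
  | none => 0                                           -- max([]) raises ValueError (outside Pre_)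
  | some target =>
    match PySem.List.index? in_lst target with
    | some i => (i : Int)
    | none => 0                                         -- unreachable: target ∈ in_lst

-- ===== PRECONDITION & SPEC =====
-- Pre_ excludes the empty list (min([]) raises ValueError) and inputs where every
-- element exceeds cup (A recurses forever downward and raises RecursionError).
def Pre_destination_cup (in_lst : List Int) (cup : Int) : Prop :=
  in_lst ≠ [] ∧ ∃ x ∈ in_lst, x ≤ cup
instance (in_lst : List Int) (cup : Int) : Decidable (Pre_destination_cup in_lst cup) := by
  unfold Pre_destination_cup; infer_instance

def pvWitness_destination_cup : List Int × Int := ([3, 8, 9, 1], 3)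

def Spec_destination_cup (in_lst : List Int) (cup : Int) (out : Int) : Prop := out = destination_cup_alt in_lst cup
instance (in_lst : List Int) (cup : Int) (out : Int) : Decidable (Spec_destination_cup in_lst cup out) := by unfold Spec_destination_cup; infer_instance

-- ===== CLAIM (what is proved, stated in full; the proofs are below) =====
def Claim_equal_destination_cup : Prop := ∀ (in_lst : List Int) (cup : Int), Dom_destination_cup in_lst cup → Pre_destination_cup in_lst cup → Spec_destination_cup in_lst cup (destination_cup in_lst cup)


-- ===== LEMMAS AND PROOFS =====

-- When cup-1 occurs in the list, B's target is exactly cup-1.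
lemma alt_of_found (l : List Int) (cup : Int) (i : Nat)
    (hfound : PySem.List.index? l (cup - 1) = some i) :
    destination_cup_alt l cup = (i : Int) := by
  have hmem : (cup - 1) ∈ l := (PySem.List.index?_isSome_iff _ _).mp (by rw [hfound]; rfl)
  have hmemb : (cup - 1) ∈ l.filter (fun x => decide (x < cup)) := by
    simp only [List.mem_filter]; exact ⟨hmem, by simp⟩
  have hne : l.filter (fun x => decide (x < cup)) ≠ [] := by
    intro h; rw [h] at hmemb; exact absurd hmemb (List.not_mem_nil)
  obtain ⟨m, hm⟩ : ∃ m, PySem.List.max? (l.filter (fun x => decide (x < cup))) (fun x => x) = some m := by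
    cases hmax : PySem.List.max? (l.filter (fun x => decide (x < cup))) (fun x => x) with
    | none => exact absurd (((PySem.List.max?_eq_none_iff _ _).mp hmax)) hne
    | some m => exact ⟨m, rfl⟩
  have hmmem := PySem.List.max?_mem hm
  have hmax := PySem.List.max?_isMax hm _ hmemb
  have hmlt : m < cup := by
    have := (List.mem_filter.mp hmmem).2; simp at this; exact this
  have hmeq : m = cup - 1 := by omega
  simp only [destination_cup_alt, List.isEmpty_iff, if_neg hne, hm, hmeq, hfound]

-- Core: A's fuelled recursion equals B, given min? l = some lo, lo ≤ cup and enough fuel.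
lemma go_eq_alt (l : List Int) (lo : Int) (hlo : PySem.List.min? l (fun x => x) = some lo) :
    ∀ (fuel : Nat) (cup : Int), lo ≤ cup → (cup - lo).toNat + 2 ≤ fuel →
      destCupGo l cup fuel = destination_cup_alt l cup := by
  intro fuel
  induction fuel with
  | zero => intro cup _ hf; omega
  | succ fuel ih =>
    intro cup hcup hf
    cases hidx : PySem.List.index? l (cup - 1) with
    | some i =>
      rw [alt_of_found l cup i hidx]
      simp only [destCupGo, hidx]
    | none =>
      have hnotmem : (cup - 1) ∉ l := (PySem.List.index?_eq_none_iff _ _).mp hidx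
      by_cases hlocup : cup = lo
      · -- wrap: A recurses at hi+1 and finds hi at once; B's filter is empty, target = max l
        have hlne : l ≠ [] := fun h => by simp [h, PySem.List.min?] at hlo
        obtain ⟨hi, hhi⟩ : ∃ hi, PySem.List.max? l (fun x => x) = some hi := by
          cases hmax : PySem.List.max? l (fun x => x) with
          | none => exact absurd (((PySem.List.max?_eq_none_iff _ _).mp hmax)) hlne
          | some m => exact ⟨m, rfl⟩
        have hhimem := PySem.List.max?_mem hhi
        obtain ⟨j, hj⟩ : ∃ j, PySem.List.index? l hi = some j := by
          cases hargj : PySem.List.index? l hi with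
          | none => exact absurd ((PySem.List.index?_eq_none_iff _ _).mp hargj) (by simp [hhimem])
          | some j => exact ⟨j, rfl⟩
        -- the filter below cup = lo is empty (lo is minimal)
        have hfe : l.filter (fun x => decide (x < cup)) = [] := by
          rw [List.filter_eq_nil_iff]
          intro x hx
          have := PySem.List.min?_isMin hlo x hx
          simp; omega
        have hstep : destCupGo l (hi + 1) fuel = (j : Int) := by
          cases fuel with
          | zero => omega
          | succ fuel' =>
            have : PySem.List.index? l (hi + 1 - 1) = some j := by
              simpa using hj
            simp only [destCupGo, this]
        simp only [destCupGo, hidx, hlo, if_pos hlocup, hhi, hstep]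
        have hj' : List.idxOf? hi l = some j := by simpa using hj
        simp [destination_cup_alt, hfe, hhi, hj']
      · -- step down: A recurses at cup-1; B's filter is unchanged since cup-1 ∉ l
        have hrec : destCupGo l cup (fuel + 1) = destCupGo l (cup - 1) fuel := by
          simp only [destCupGo, hidx, hlo, if_neg hlocup]
        rw [hrec, ih (cup - 1) (by omega) (by omega)]
        have hfeq : l.filter (fun x => decide (x < cup - 1)) = l.filter (fun x => decide (x < cup)) := by
          apply List.filter_congr
          intro x hx
          have : x ≠ cup - 1 := fun h => hnotmem (h ▸ hx)
          simp; omega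
        simp only [destination_cup_alt, hfeq]

-- ===== VERDICT (by name: the statement is the Claim_ definition above) =====
theorem destination_cup_spec : Claim_equal_destination_cup := by
  intro l cup _ hpre
  obtain ⟨hne, x, hx, hxc⟩ := hpre
  obtain ⟨lo, hlo⟩ : ∃ lo, PySem.List.min? l (fun x => x) = some lo := by
    cases hmin : PySem.List.min? l (fun x => x) with
    | none => exact absurd (((PySem.List.min?_eq_none_iff _ _).mp hmin)) hne
    | some m => exact ⟨m, rfl⟩
  have hlocup : lo ≤ cup := le_trans (PySem.List.min?_isMin hlo x hx) hxc
  show destination_cup l cup = destination_cup_alt l cup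
  simp only [destination_cup, hlo]
  exact go_eq_alt l lo hlo _ cup hlocup (le_refl _)
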